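-- pv_equiv track=rewrite | github.com/martynadyja/lab1. | lab4.zad.5.py | value_and_count
-- ===== SOURCE A (Python) =====
-- def value_and_count(list):
--     Value_list = []
--     Count_list = []
--     for x in list:
--         if x not in Value_list:
--             Value_list.append(x)
--             Count_list.append(1)
--         else:
--             Count_list[Value_list.index(x)] += 1
--     return Value_list, Count_list
-- ===== SOURCE B (Python) =====
-- def value_and_count(list):
--     # Peel algorithm: repeatedly take the first remaining value, count its
--     # occurrences in the remaining list, then remove them all; repeat until empty.
--     values = []
--     counts = []
--     rest = list[:]
--     while rest:
--         x = rest[0]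
--         c = rest.count(x)
--         values.append(x)
--         counts.append(c)
--         for _ in range(c):
--             rest.remove(x)
--     return values, counts
-- ===== Notes on version B (the rewrite author's own statement) =====
-- stated objective: alternative
-- what changed: Replaces A's single fused loop with membership tests and list.index into a growing value list by a peel algorithm on a shrinking copy: repeatedly take the first remaining value, count it with list.count, remove all its occurrences, and repeat; no membership test, no index, no per-value increments.
import Mathlib
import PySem

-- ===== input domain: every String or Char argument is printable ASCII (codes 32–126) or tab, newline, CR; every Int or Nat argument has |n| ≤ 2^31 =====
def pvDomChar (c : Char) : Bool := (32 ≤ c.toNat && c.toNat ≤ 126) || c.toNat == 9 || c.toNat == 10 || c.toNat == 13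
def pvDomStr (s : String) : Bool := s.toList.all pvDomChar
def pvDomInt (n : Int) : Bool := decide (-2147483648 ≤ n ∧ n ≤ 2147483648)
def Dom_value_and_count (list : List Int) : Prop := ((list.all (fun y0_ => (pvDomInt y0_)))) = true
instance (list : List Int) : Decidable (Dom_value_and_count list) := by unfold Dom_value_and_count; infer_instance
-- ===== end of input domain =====

-- B replaces A's fused loop (membership test + list.index into the growing value list) by a
-- peel algorithm: take the first remaining value, count it in the remaining list, filter all
-- its occurrences out, repeat; same return value, similar cost ("alternative").

-- ===== PORT A =====
def value_and_count (list : List Int) : List Int × List Int :=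
  list.foldl (fun s x =>
    if x ∉ s.1 then
      (s.1 ++ [x], s.2 ++ [1])
    else
      match PySem.List.index? s.1 x with
      | some i => (s.1, s.2.modify i (· + 1))
      | none => (s.1, s.2))   -- unreachable: x ∈ s.1 in this branch
    ([], [])

-- ===== PORT B =====
-- rest.remove(x) executed c times (the 'for _ in range(c): rest.remove(x)' loop);
-- the .getD fallback is unreachable: the loop is only entered with c ≤ rest.count x
def vacRemoveN : Nat → List Int → Int → List Int
  | 0, rest, _ => rest
  | Nat.succ c, rest, x => vacRemoveN c ((PySem.List.remove? rest x).getD rest) x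

-- termination helper for vacPeel (cited by its decreasing_by): removing the head's
-- occurrences strictly shortens the list
lemma remove?_spec (x : Int) : ∀ (l : List Int), x ∈ l →
    ∃ l', PySem.List.remove? l x = some l' ∧ l'.count x + 1 = l.count x ∧
      l'.filter (fun y => y != x) = l.filter (fun y => y != x) ∧ l'.length + 1 = l.length := by
  intro l hx
  induction l with
  | nil => cases hx
  | cons a t ih =>
    by_cases hax : a = x
    · subst hax
      refine ⟨t, ?_, ?_, ?_, ?_⟩
      · simp [PySem.List.remove?, List.idxOf?_cons]
      · simp
      · simp
      · simp
    · have hxt : x ∈ t := by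
        cases hx with
        | head => exact absurd rfl hax
        | tail _ h => exact h
      obtain ⟨t', h1, h2, h3, h4⟩ := ih hxt
      refine ⟨a :: t', ?_, ?_, ?_, ?_⟩
      · have hremove : PySem.List.remove? (a :: t) x
            = Option.map (fun l => a :: l) (PySem.List.remove? t x) := by
          simp only [PySem.List.remove?, List.idxOf?_cons]
          have hne : (a == x) = false := by simp [hax]
          rw [hne]
          simp only [Bool.false_eq_true, if_false, Option.map_map]
          cases List.idxOf? x t <;> simp [List.eraseIdx]
        rw [hremove, h1]
        rfl
      · have hxa : ¬ x = a := fun e => hax e.symm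
        simp [List.count_cons]
        omega
      · have hax' : (a != x) = true := by simp [hax]
        simp [hax', h3]
      · simp [h4]

lemma vacRemoveN_count (x : Int) (n : Nat) : ∀ (l : List Int), l.count x = n →
    vacRemoveN n l x = l.filter (fun y => y != x) := by
  induction n with
  | zero =>
    intro l h
    have hx : x ∉ l := by
      rw [← List.count_eq_zero]
      exact h
    rw [vacRemoveN]
    symm
    rw [List.filter_eq_self]
    intro a ha
    simp only [bne_iff_ne, ne_eq]
    exact fun e => hx (e ▸ ha)
  | succ n ih =>
    intro l h
    have hx : x ∈ l := by
      rw [← List.count_pos_iff]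
      omega
    obtain ⟨l', h1, h2, h3, _⟩ := remove?_spec x l hx
    rw [vacRemoveN, h1]
    simp only [Option.getD_some]
    rw [ih l' (by omega), h3]

lemma vacRemoveN_head_lt (x : Int) (t : List Int) :
    (vacRemoveN ((x :: t).count x) (x :: t) x).length < (x :: t).length := by
  rw [vacRemoveN_count x _ _ rfl]
  have : (x != x) = false := by simp
  simp only [List.filter_cons, this, List.length_cons]
  exact Nat.lt_succ_of_le (List.length_filter_le _ _)

-- the while loop of Source B, as recursion on the shrinking 'rest'
def vacPeel : List Int → List Int × List Int
  | [] => ([], [])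
  | x :: t =>
      -- x = rest[0]; c = rest.count(x); then the remove loop shrinks rest
      (x :: (vacPeel (vacRemoveN ((x :: t).count x) (x :: t) x)).1,
       (((x :: t).count x : Int)) :: (vacPeel (vacRemoveN ((x :: t).count x) (x :: t) x)).2)
termination_by l => l.length
decreasing_by
  all_goals exact vacRemoveN_head_lt x t

def value_and_count_alt (list : List Int) : List Int × List Int := vacPeel list

-- ===== PRECONDITION & SPEC =====
def Spec_value_and_count (list : List Int) (out : List Int × List Int) : Prop := out = value_and_count_alt list
instance (list : List Int) (out : List Int × List Int) : Decidable (Spec_value_and_count list out) := by unfold Spec_value_and_count; infer_instance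

-- ===== CLAIM (what is proved, stated in full; the proofs are below) =====
def Claim_equal_value_and_count : Prop := ∀ (list : List Int), Dom_value_and_count list → Spec_value_and_count list (value_and_count list)

-- ===== LEMMAS AND PROOFS =====

-- Incrementing the count at the index of x in a duplicate-free list = bumping exactly x's count.
lemma countmap_modify (vs : List Int) (c : Int → Int) (x : Int) (i : Nat)
    (h : PySem.List.index? vs x = some i) (hn : vs.Nodup) :
    vs.map (fun v => c v + if v = x then 1 else 0) = (vs.map c).modify i (· + 1) := by
  induction vs generalizing i with
  | nil => simp [PySem.List.index?] at h
  | cons a t ih =>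
    rw [List.nodup_cons] at hn
    obtain ⟨ha, hn⟩ := hn
    by_cases hax : a = x
    · subst hax
      rw [PySem.List.index?_cons_self] at h
      cases h
      simp only [List.map_cons, List.modify]
      have : ∀ v ∈ t, c v + (if v = a then 1 else 0) = c v := by
        intro v hv
        have hne : ¬ v = a := fun e => ha (e ▸ hv)
        simp [hne]
      simp [List.map_congr_left this]
    · rw [PySem.List.index?_cons_of_ne t hax] at h
      obtain ⟨j, hj, hji⟩ := Option.map_eq_some_iff.1 h
      subst hji
      simp only [List.map_cons, List.modify_succ_cons]
      rw [ih j hj hn]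
      simp [hax]

-- Characterisation of A's loop result.
lemma value_and_count_eq (l : List Int) :
    value_and_count l =
      (PySem.List.dedup l, (PySem.List.dedup l).map (fun v => (l.count v : Int))) := by
  induction l using List.reverseRecOn with
  | nil => rfl
  | append_singleton l x ih =>
    unfold value_and_count at ih ⊢
    rw [List.foldl_append, ih]
    simp only [List.foldl_cons, List.foldl_nil]
    have hd : PySem.List.dedup (l ++ [x]) = PySem.Set.add (PySem.List.dedup l) x := by
      simp [PySem.List.dedup_eq_ofList, PySem.Set.ofList_append_singleton]
    by_cases hx : x ∈ l
    · have hmem : x ∈ PySem.List.dedup l := by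
        simpa [PySem.List.mem_dedup] using hx
      obtain ⟨i, hi⟩ : ∃ i, PySem.List.index? (PySem.List.dedup l) x = some i := by
        have := (PySem.List.index?_isSome_iff (xs := PySem.List.dedup l) (v := x)).2 hmem
        exact Option.isSome_iff_exists.1 this
      rw [hd, PySem.Set.add_of_mem hmem]
      simp only [hmem, not_true_eq_false, if_false, hi]
      refine Prod.ext rfl ?_
      have : (PySem.List.dedup l).map (fun v => ((l ++ [x]).count v : Int)) =
          (PySem.List.dedup l).map
            (fun v => (l.count v : Int) + if v = x then 1 else 0) := by
        apply List.map_congr_left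
        intro v _
        by_cases hvx : v = x
        · simp [hvx, List.count_append]
        · have hxv : ¬ x = v := fun e => hvx e.symm
          simp [hvx, hxv, List.count_append]
      rw [this, countmap_modify _ _ _ _ hi (PySem.List.nodup_dedup l)]
    · have hmem : x ∉ PySem.List.dedup l := by
        simpa [PySem.List.mem_dedup] using hx
      rw [hd, PySem.Set.add_of_not_mem hmem]
      simp only [hmem, not_false_eq_true, if_true]
      refine Prod.ext rfl ?_
      rw [List.map_append]
      have h1 : (PySem.List.dedup l).map (fun v => ((l ++ [x]).count v : Int)) =
          (PySem.List.dedup l).map (fun v => (l.count v : Int)) := by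
        apply List.map_congr_left
        intro v hv
        have hxv : ¬ x = v := fun e => hmem (e ▸ hv)
        simp [List.count_append, hxv]
      have h2 : [x].map (fun v => ((l ++ [x]).count v : Int)) = [1] := by
        simp [List.count_append, List.count_eq_zero.2 hx]
      rw [h1, h2]

-- Adding elements already present (as x is) lets us drop all occurrences of x from the tail.
lemma foldl_add_filter (x : Int) (t : List Int) (s : PySem.Set Int) (hx : x ∈ s) :
    List.foldl PySem.Set.add s t =
      List.foldl PySem.Set.add s (t.filter (fun y => y != x)) := by
  induction t generalizing s with
  | nil => rfl
  | cons a t ih =>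
    by_cases hax : a = x
    · subst hax
      have : PySem.Set.add s a = s := PySem.Set.add_of_mem hx
      simp [this, ih s hx]
    · have hx' : x ∈ PySem.Set.add s a := by
        simp [PySem.Set.mem_add, hx]
      simp only [List.filter_cons, bne_iff_ne, hax, ne_eq, not_false_eq_true,
        if_true, List.foldl_cons]
      exact ih _ hx'

-- A leading singleton accumulator factors out when its element never recurs.
lemma foldl_add_cons (x : Int) (t : List Int) (s : PySem.Set Int) (hx : x ∉ t) :
    List.foldl PySem.Set.add (x :: s) t = x :: List.foldl PySem.Set.add s t := by
  induction t generalizing s with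
  | nil => rfl
  | cons a t ih =>
    have hax : a ≠ x := fun e => hx (e ▸ List.mem_cons_self)
    have hx' : x ∉ t := fun h => hx (List.mem_cons_of_mem _ h)
    have hadd : PySem.Set.add (x :: s) a = x :: PySem.Set.add s a := by
      by_cases hmem : a ∈ s
      · rw [PySem.Set.add_of_mem hmem, PySem.Set.add_of_mem (List.mem_cons_of_mem x hmem)]
      · have hns : a ∉ (x :: s) := by simp [hax, hmem]
        rw [PySem.Set.add_of_not_mem hmem, PySem.Set.add_of_not_mem hns, List.cons_append]
    rw [List.foldl_cons, List.foldl_cons, hadd, ih _ hx']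

-- dedup peels its head: the head followed by the dedup of the x-free remainder.
lemma dedup_cons_filter (x : Int) (t : List Int) :
    PySem.List.dedup (x :: t) = x :: PySem.List.dedup (t.filter (fun y => y != x)) := by
  have h0 : PySem.List.dedup (x :: t) = List.foldl PySem.Set.add [x] t := by
    simp [PySem.List.dedup, PySem.Set.ofList, PySem.Set.add, PySem.Set.empty,
      List.foldl_cons]
  rw [h0, foldl_add_filter x t [x] (by simp)]
  have hxf : x ∉ t.filter (fun y => y != x) := by
    simp [List.mem_filter]
  rw [show ([x] : PySem.Set Int) = x :: ([] : List Int) from rfl,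
    foldl_add_cons x _ [] hxf]
  rfl

-- Characterisation of B's peel loop, by induction on a length bound for the shrinking 'rest'.
lemma vacPeel_eq_aux (n : Nat) : ∀ (l : List Int), l.length ≤ n →
    vacPeel l = (PySem.List.dedup l, (PySem.List.dedup l).map (fun v => (l.count v : Int))) := by
  induction n with
  | zero =>
    intro l h
    have hl : l = [] := List.eq_nil_of_length_eq_zero (Nat.le_zero.1 h)
    subst hl
    simp [vacPeel, PySem.List.dedup, PySem.Set.ofList, PySem.Set.empty]
  | succ n ih =>
    intro l h
    cases l with
    | nil => simp [vacPeel, PySem.List.dedup, PySem.Set.ofList, PySem.Set.empty]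
    | cons x t =>
      have hlen : (t.filter (fun y => y != x)).length ≤ n := by
        have := List.length_filter_le (fun y => y != x) t
        simp only [List.length_cons, Nat.succ_le_succ_iff] at h
        omega
      have hrw : vacRemoveN ((x :: t).count x) (x :: t) x = t.filter (fun y => y != x) := by
        rw [vacRemoveN_count x _ _ rfl]
        have hxx : (x != x) = false := by simp
        simp
      rw [vacPeel, hrw, ih _ hlen, dedup_cons_filter x t]
      simp only [List.map_cons]
      refine Prod.ext rfl ?_
      simp only
      congr 1
      apply List.map_congr_left
      intro v hv
      have hvmem : v ∈ t.filter (fun y => y != x) := by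
        rwa [PySem.List.mem_dedup] at hv
      have hvx : v ≠ x := by
        have := (List.mem_filter.1 hvmem).2
        simpa using this
      have hxv : ¬ x = v := fun e => hvx e.symm
      congr 1
      rw [List.count_cons]
      simp only [hxv, beq_iff_eq, if_false, add_zero]
      rw [List.count_filter]
      simp [hvx]

lemma vacPeel_eq (l : List Int) :
    vacPeel l = (PySem.List.dedup l, (PySem.List.dedup l).map (fun v => (l.count v : Int))) :=
  vacPeel_eq_aux l.length l (le_refl _)

-- ===== VERDICT (by name: the statement is the Claim_ definition above) =====
theorem value_and_count_spec : Claim_equal_value_and_count := by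
  intro l _
  unfold Spec_value_and_count value_and_count_alt
  rw [value_and_count_eq, vacPeel_eq]
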